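-- pv_equiv track=rewrite | github.com/ProjectAlita/alita-sdk | alita_sdk/tools/figma/toon_tools.py | get_key_components
-- ===== SOURCE A (Python) =====
-- from typing import Callable, Dict, List, Optional, Tuple, Any
--
-- COMPONENT_CATEGORIES = {
--     'buttons': ['button', 'btn', 'cta', 'action', 'submit'],
--     'inputs': ['input', 'textfield', 'textarea', 'field', 'form'],
--     'selects': ['dropdown', 'select', 'picker', 'combo', 'menu'],
--     'toggles': ['toggle', 'switch', 'checkbox', 'radio'],
--     'cards': ['card', 'tile', 'item', 'cell'],
--     'navigation': ['nav', 'tab', 'menu', 'breadcrumb', 'link', 'header', 'footer', 'sidebar'],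
--     'icons': ['icon', 'ico', 'glyph', 'symbol'],
--     'images': ['image', 'img', 'photo', 'avatar', 'thumbnail', 'picture'],
--     'modals': ['modal', 'dialog', 'popup', 'overlay', 'sheet', 'drawer'],
--     'lists': ['list', 'table', 'grid', 'row', 'column'],
--     'badges': ['badge', 'tag', 'chip', 'label', 'pill'],
--     'progress': ['progress', 'spinner', 'loader', 'loading', 'skeleton'],
--     'alerts': ['alert', 'toast', 'notification', 'banner', 'snackbar'],
--     'dividers': ['divider', 'separator', 'line', 'hr'],
-- }
--
-- def categorize_components(components: List[str]) -> Dict[str, List[str]]: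
--     """
--     Group components into semantic categories.
--
--     Returns:
--         {
--             'buttons': ['Button/Primary', 'Button/Secondary'],
--             'inputs': ['Input/Text', 'Input/Email'],
--             'other': ['CustomComponent'],
--             ...
--         }
--     """
--     categorized = {cat: [] for cat in COMPONENT_CATEGORIES}
--     categorized['other'] = []
--
--     for component in components:
--         comp_lower = component.lower()
--         found_category = False
--
--         for category, keywords in COMPONENT_CATEGORIES.items():
--             if any(kw in comp_lower for kw in keywords):
--                 categorized[category].append(component)
--                 found_category = True
--                 break
--
--         if not found_category:
--             categorized['other'].append(component)
--
--     # Remove empty categories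
--     return {k: v for k, v in categorized.items() if v}
--
-- def get_key_components(components: List[str], max_items: int = 5) -> List[str]:
--     """
--     Get the most important/unique component names for display.
--
--     Prioritizes:
--     - Interactive elements (buttons, inputs)
--     - Unique component names
--     - Avoids generic names (icons, dividers)
--     """
--     if not components:
--         return []
--
--     categorized = categorize_components(components)
--
--     result = []
--     # Priority order: interactive first
--     priority = ['buttons', 'inputs', 'selects', 'modals', 'cards', 'navigation', 'other']
--
--     for cat in priority:
--         if cat in categorized:
--             # Take first few unique components from this category
--             for comp in categorized[cat]:
--                 if comp not in result:
--                     result.append(comp)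
--                     if len(result) >= max_items:
--                         return result
--
--     return result
-- ===== SOURCE B (Python) =====
-- COMPONENT_CATEGORIES = {
--     'buttons': ['button', 'btn', 'cta', 'action', 'submit'],
--     'inputs': ['input', 'textfield', 'textarea', 'field', 'form'],
--     'selects': ['dropdown', 'select', 'picker', 'combo', 'menu'],
--     'toggles': ['toggle', 'switch', 'checkbox', 'radio'],
--     'cards': ['card', 'tile', 'item', 'cell'],
--     'navigation': ['nav', 'tab', 'menu', 'breadcrumb', 'link', 'header', 'footer', 'sidebar'],
--     'icons': ['icon', 'ico', 'glyph', 'symbol'],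
--     'images': ['image', 'img', 'photo', 'avatar', 'thumbnail', 'picture'],
--     'modals': ['modal', 'dialog', 'popup', 'overlay', 'sheet', 'drawer'],
--     'lists': ['list', 'table', 'grid', 'row', 'column'],
--     'badges': ['badge', 'tag', 'chip', 'label', 'pill'],
--     'progress': ['progress', 'spinner', 'loader', 'loading', 'skeleton'],
--     'alerts': ['alert', 'toast', 'notification', 'banner', 'snackbar'],
--     'dividers': ['divider', 'separator', 'line', 'hr'],
-- }
--
-- _PRIORITY = ['buttons', 'inputs', 'selects', 'modals', 'cards', 'navigation', 'other']
--
-- def _classify(name):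
--     low = name.lower()
--     for category, keywords in COMPONENT_CATEGORIES.items():
--         if any(kw in low for kw in keywords):
--             return category
--     return 'other'
--
-- def get_key_components(components, max_items=5):
--     result = []
--     for cat in _PRIORITY:
--         for comp in components:
--             if _classify(comp) == cat and comp not in result:
--                 result.append(comp)
--                 if len(result) >= max_items:
--                     return result
--     return result
-- ===== Notes on version B (the rewrite author's own statement) =====
-- stated objective: simpler
-- what changed: Replaces building the full category->components dict (categorize_components) and then reading it back with a one-component classifier helper plus a direct nested loop: for each priority category scan the components in order, appending first-match-classified unseen names until max_items.
import Mathlib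
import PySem

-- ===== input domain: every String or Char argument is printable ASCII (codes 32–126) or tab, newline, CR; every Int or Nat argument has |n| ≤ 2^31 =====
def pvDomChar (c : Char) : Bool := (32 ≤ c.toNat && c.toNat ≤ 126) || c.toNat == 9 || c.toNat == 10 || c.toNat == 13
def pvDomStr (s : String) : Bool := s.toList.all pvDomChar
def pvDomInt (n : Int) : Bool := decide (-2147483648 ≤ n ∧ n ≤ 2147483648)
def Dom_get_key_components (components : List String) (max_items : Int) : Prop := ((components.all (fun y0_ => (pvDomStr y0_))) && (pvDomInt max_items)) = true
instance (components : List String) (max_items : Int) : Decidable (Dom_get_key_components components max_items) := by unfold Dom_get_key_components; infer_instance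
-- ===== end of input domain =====

-- B replaces A's full category-index dict with a per-component classifier and a
-- direct priority-by-priority scan of the input (simpler decomposition, same results).

-- the module constant COMPONENT_CATEGORIES (a dict only ever iterated in order)
def pvCATS : List (String × List String) :=
  [("buttons", ["button", "btn", "cta", "action", "submit"]),
   ("inputs", ["input", "textfield", "textarea", "field", "form"]),
   ("selects", ["dropdown", "select", "picker", "combo", "menu"]),
   ("toggles", ["toggle", "switch", "checkbox", "radio"]),
   ("cards", ["card", "tile", "item", "cell"]),
   ("navigation", ["nav", "tab", "menu", "breadcrumb", "link", "header", "footer", "sidebar"]),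
   ("icons", ["icon", "ico", "glyph", "symbol"]),
   ("images", ["image", "img", "photo", "avatar", "thumbnail", "picture"]),
   ("modals", ["modal", "dialog", "popup", "overlay", "sheet", "drawer"]),
   ("lists", ["list", "table", "grid", "row", "column"]),
   ("badges", ["badge", "tag", "chip", "label", "pill"]),
   ("progress", ["progress", "spinner", "loader", "loading", "skeleton"]),
   ("alerts", ["alert", "toast", "notification", "banner", "snackbar"]),
   ("dividers", ["divider", "separator", "line", "hr"])]

-- ===== PORT A =====
-- A's inner 'for category, keywords in COMPONENT_CATEGORIES.items(): … break'
def pvFirstCat : String → List (String × List String) → Option String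
  | _, [] => none
  | low, (cat, kws) :: rest =>
    if kws.any (fun kw => PySem.Str.isIn kw low) then some cat else pvFirstCat low rest

def categorize_components (components : List String) : PySem.Dict String (List String) :=
  let init := (pvCATS.foldl (fun d p => d.insert p.1 ([] : List String)) PySem.Dict.empty).insert "other" []
  let filled := components.foldl (fun d comp =>
      match pvFirstCat (PySem.Str.lower comp) pvCATS with
      | some cat => d.modify cat [] (fun v => v ++ [comp])
      | none => d.modify "other" [] (fun v => v ++ [comp])) init
  PySem.Dict.ofList (filled.items.filter (fun p => !p.2.isEmpty))

-- A's 'for comp in categorized[cat]: …' with the early 'return result'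
def pvInnerA (max_items : Int) : List String → List String → (List String ⊕ List String)
  | [], result => .inr result
  | comp :: rest, result =>
    if result.contains comp then pvInnerA max_items rest result
    else
      let result' := result ++ [comp]
      if max_items ≤ (result'.length : Int) then .inl result'
      else pvInnerA max_items rest result'

def pvOuterA (categorized : PySem.Dict String (List String)) (max_items : Int) :
    List String → List String → List String
  | [], result => result
  | cat :: rest, result =>
    if categorized.contains cat then
      match pvInnerA max_items (categorized.getD cat []) result with
      | .inl res => res
      | .inr result' => pvOuterA categorized max_items rest result'
    else pvOuterA categorized max_items rest result

def get_key_components (components : List String) (max_items : Int) : List String :=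
  if components.isEmpty then []
  else
    pvOuterA (categorize_components components) max_items
      ["buttons", "inputs", "selects", "modals", "cards", "navigation", "other"] []

-- ===== PORT B =====
-- B's _classify helper: first matching category, else 'other'
def pvClassifyGo : String → List (String × List String) → String
  | _, [] => "other"
  | low, (cat, kws) :: rest =>
    if kws.any (fun kw => PySem.Str.isIn kw low) then cat else pvClassifyGo low rest

def pvClassify (name : String) : String := pvClassifyGo (PySem.Str.lower name) pvCATS

-- B's inner 'for comp in components: …' with the early 'return result'
def pvInnerB (max_items : Int) (cat : String) : List String → List String → (List String ⊕ List String)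
  | [], result => .inr result
  | comp :: rest, result =>
    if pvClassify comp == cat && !(result.contains comp) then
      let result' := result ++ [comp]
      if max_items ≤ (result'.length : Int) then .inl result'
      else pvInnerB max_items cat rest result'
    else pvInnerB max_items cat rest result

def pvOuterB (components : List String) (max_items : Int) : List String → List String → List String
  | [], result => result
  | cat :: rest, result =>
    match pvInnerB max_items cat components result with
    | .inl res => res
    | .inr result' => pvOuterB components max_items rest result'

def get_key_components_alt (components : List String) (max_items : Int) : List String :=
  pvOuterB components max_items
    ["buttons", "inputs", "selects", "modals", "cards", "navigation", "other"] []

-- ===== PRECONDITION & SPEC =====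
def Spec_get_key_components (components : List String) (max_items : Int) (out : List String) : Prop := out = get_key_components_alt components max_items
instance (components : List String) (max_items : Int) (out : List String) : Decidable (Spec_get_key_components components max_items out) := by unfold Spec_get_key_components; infer_instance

-- ===== CLAIM (what is proved, stated in full; the proofs are below) =====
def Claim_equal_get_key_components : Prop := ∀ (components : List String) (max_items : Int), Dom_get_key_components components max_items → Spec_get_key_components components max_items (get_key_components components max_items)

-- ===== LEMMAS AND PROOFS =====

theorem pvClassifyGo_eq (low : String) (l : List (String × List String)) :
    pvClassifyGo low l = (pvFirstCat low l).getD "other" := by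
  induction l with
  | nil => rfl
  | cons p rest ih =>
    obtain ⟨cat, kws⟩ := p
    simp only [pvClassifyGo, pvFirstCat]
    split <;> simp [ih]

theorem pv_bodyA_eq :
    (fun (d : PySem.Dict String (List String)) comp =>
        match pvFirstCat (PySem.Str.lower comp) pvCATS with
        | some cat => d.modify cat [] (fun v => v ++ [comp])
        | none => d.modify "other" [] (fun v => v ++ [comp]))
      = fun d comp => d.modify (pvClassify comp) [] (fun v => v ++ [comp]) := by
  funext d comp
  simp only [pvClassify, pvClassifyGo_eq]
  cases pvFirstCat (PySem.Str.lower comp) pvCATS <;> rfl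

theorem pv_getD_insert_nil (l : List (String × List String)) :
    ∀ (d : PySem.Dict String (List String)), (∀ k', d.getD k' ([] : List String) = []) →
      ∀ k, (l.foldl (fun d p => d.insert p.1 ([] : List String)) d).getD k [] = [] := by
  induction l with
  | nil => intro d hd k; exact hd k
  | cons p rest ih =>
    intro d hd k
    refine ih (d.insert p.1 []) (fun k' => ?_) k
    rw [PySem.Dict.getD_insert]
    split <;> [rfl; exact hd k']

theorem pv_getD_mk_filter (l : List (String × List String))
    (hnd : (l.map Prod.fst).Nodup) (k : String) :
    (PySem.Dict.mk (l.filter (fun p => !p.2.isEmpty))).getD k ([] : List String)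
      = (PySem.Dict.mk l).getD k [] := by
  induction l with
  | nil => rfl
  | cons p rest ih =>
    obtain ⟨a, v⟩ := p
    simp only [List.map_cons, List.nodup_cons] at hnd
    by_cases hak : a = k
    · subst hak
      by_cases hv : v.isEmpty
      · have hv' : v = [] := List.isEmpty_iff.mp hv
        have hnot : a ∉ (PySem.Dict.mk (rest.filter (fun p => !p.2.isEmpty))).keys := by
          intro hmem
          apply hnd.1
          simp only [PySem.Dict.keys] at hmem
          rcases List.mem_map.mp hmem with ⟨q, hq, hq1⟩
          exact List.mem_map.mpr ⟨q, List.mem_of_mem_filter hq, hq1⟩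
        rw [List.filter_cons_of_neg (by simp [hv])]
        rw [PySem.Dict.getD_eq_get?_getD, (PySem.Dict.get?_eq_none_iff_not_mem_keys _ _).mpr hnot]
        simp [PySem.Dict.getD_eq_get?_getD, PySem.Dict.get?_mk_cons, hv']
      · rw [List.filter_cons_of_pos (by simp [hv])]
        simp [PySem.Dict.getD_eq_get?_getD, PySem.Dict.get?_mk_cons]
    · have hbe : (a == k) = false := by simpa using hak
      by_cases hv : v.isEmpty
      · rw [List.filter_cons_of_neg (by simp [hv]), ih hnd.2]
        simp [PySem.Dict.getD_eq_get?_getD, PySem.Dict.get?_mk_cons, hbe]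
      · rw [List.filter_cons_of_pos (by simp [hv])]
        simp only [PySem.Dict.getD_eq_get?_getD, PySem.Dict.get?_mk_cons, hbe, if_false,
          Bool.false_eq_true]
        rw [← PySem.Dict.getD_eq_get?_getD, ← PySem.Dict.getD_eq_get?_getD, ih hnd.2]

theorem pv_getD_categorize (components : List String) (cat : String) :
    (categorize_components components).getD cat ([] : List String)
      = components.filter (fun c => pvClassify c == cat) := by
  unfold categorize_components
  rw [pv_bodyA_eq]
  set init := (pvCATS.foldl (fun d p => d.insert p.1 ([] : List String)) PySem.Dict.empty).insert "other" [] with hinit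
  have hinit_nodup : init.keys.Nodup := by
    rw [hinit]
    exact PySem.Dict.nodup_keys_insert _ _ _
      (PySem.Dict.nodup_keys_foldl_insert_key pvCATS Prod.fst (fun _ _ => []) PySem.Dict.empty
        PySem.Dict.nodup_keys_empty)
  set filled := components.foldl (fun d comp => d.modify (pvClassify comp) [] (fun v => v ++ [comp])) init with hfilled
  have hfk : filled.keys.Nodup := by
    rw [hfilled]
    exact PySem.Dict.nodup_keys_foldl_modify_key components pvClassify []
      (fun _ comp => fun v => v ++ [comp]) init hinit_nodup
  have hfoldmap : filled = (components.map (fun c => (pvClassify c, c))).foldl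
      (fun d p => d.modify p.1 [] (fun v => v ++ [p.2])) init := by
    rw [hfilled, List.foldl_map]
  have hfilledD : ∀ k, filled.getD k ([] : List String)
      = init.getD k [] ++ components.filter (fun c => pvClassify c == k) := by
    intro k
    rw [hfoldmap, PySem.Dict.getD_foldl_modify_append]
    congr 1
    rw [List.filter_map]
    simp [Function.comp_def]
  have hinitD : ∀ k, init.getD k ([] : List String) = [] := by
    intro k
    rw [hinit, PySem.Dict.getD_insert]
    split
    · rfl
    · exact pv_getD_insert_nil pvCATS PySem.Dict.empty (fun k' => PySem.Dict.getD_empty k' []) k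
  have hfresh : (PySem.Dict.ofList (filled.items.filter (fun p => !p.2.isEmpty))).items
      = filled.items.filter (fun p => !p.2.isEmpty) := by
    have hnd2 : ((filled.items.filter (fun p => !p.2.isEmpty)).map Prod.fst).Nodup := by
      refine List.Nodup.sublist ?_ hfk
      exact List.Sublist.map Prod.fst (List.filter_sublist (l := filled.items))
    have := PySem.Dict.items_foldl_insert_fresh
      (l := filled.items.filter (fun p => !p.2.isEmpty))
      (k := Prod.fst) (v := Prod.snd) (d := PySem.Dict.empty)
      (by intro a _; exact PySem.Dict.contains_empty a.1) hnd2
    simpa [PySem.Dict.ofList] using this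
  have hofl : PySem.Dict.ofList (filled.items.filter (fun p => !p.2.isEmpty))
      = PySem.Dict.mk (filled.items.filter (fun p => !p.2.isEmpty)) :=
    PySem.Dict.ext (by simpa using hfresh)
  rw [hofl, pv_getD_mk_filter _ (by simpa [PySem.Dict.keys] using hfk) cat]
  have hmkf : PySem.Dict.mk filled.items = filled := PySem.Dict.ext rfl
  rw [hmkf, hfilledD, hinitD]
  simp

theorem pv_inner_eq (max_items : Int) (cat : String) :
    ∀ (comps r : List String),
      pvInnerB max_items cat comps r
        = pvInnerA max_items (comps.filter (fun c => pvClassify c == cat)) r := by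
  intro comps
  induction comps with
  | nil => intro r; rfl
  | cons c cs ih =>
    intro r
    by_cases hc : pvClassify c == cat
    · rw [show List.filter (fun c => pvClassify c == cat) (c :: cs) = c :: List.filter (fun c => pvClassify c == cat) cs from List.filter_cons_of_pos hc]
      by_cases hr : r.contains c
      · simp [pvInnerB, pvInnerA, hc, ih]
      · have hr' : r.contains c = false := by simpa using hr
        simp only [pvInnerB, pvInnerA, hc, hr', Bool.not_false, Bool.and_self, if_true,
          Bool.false_eq_true, if_false]
        split <;> simp [ih]
    · have hc' : (pvClassify c == cat) = false := by simpa using hc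
      rw [show List.filter (fun c => pvClassify c == cat) (c :: cs) = List.filter (fun c => pvClassify c == cat) cs from List.filter_cons_of_neg (by simp [hc'])]
      simp [pvInnerB, hc', ih]

theorem pv_outer_eq (components : List String) (max_items : Int)
    (F : PySem.Dict String (List String))
    (hF : ∀ cat, F.getD cat ([] : List String) = components.filter (fun c => pvClassify c == cat)) :
    ∀ (prio r : List String),
      pvOuterA F max_items prio r = pvOuterB components max_items prio r := by
  intro prio
  induction prio with
  | nil => intro r; rfl
  | cons cat rest ih =>
    intro r
    simp only [pvOuterA, pvOuterB, pv_inner_eq, ← hF cat]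
    by_cases hc : F.contains cat
    · simp only [hc, if_true]
      cases pvInnerA max_items (F.getD cat []) r <;> simp [ih]
    · have hD : F.getD cat ([] : List String) = [] :=
        PySem.Dict.getD_of_not_contains (d := F) (k := cat) (d0 := []) (by simpa using hc)
      simp [hc, hD, pvInnerA, ih]

theorem pv_outerB_nil (max_items : Int) :
    ∀ (prio r : List String), pvOuterB [] max_items prio r = r := by
  intro prio
  induction prio with
  | nil => intro r; rfl
  | cons cat rest ih => intro r; simp [pvOuterB, pvInnerB, ih]


-- ===== VERDICT (by name: the statement is the Claim_ definition above) =====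
theorem get_key_components_spec : Claim_equal_get_key_components := by
  intro components max_items _
  unfold Spec_get_key_components get_key_components get_key_components_alt
  by_cases h : components.isEmpty
  · rw [if_pos h, List.isEmpty_iff.mp h, pv_outerB_nil]
  · rw [if_neg h]
    exact pv_outer_eq components max_items (categorize_components components)
      (pv_getD_categorize components) _ []
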